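-- pv_equiv track=rewrite | github.com/sa32552/cyber-global-shield | Cyber Global Shield/app/core/automated_threat_modeling.py | _check_stride_coverage
-- ===== SOURCE A (Python) =====
-- from typing import Optional, Dict, Any, List
--
-- def _check_stride_coverage(threats: List[Dict]) -> Dict[str, bool]:
--     """Check STRIDE coverage."""
--     stride = {
--         "Spoofing": False,
--         "Tampering": False,
--         "Repudiation": False,
--         "Info Disclosure": False,
--         "DoS": False,
--         "Elevation": False,
--     }
--
--     for threat in threats:
--         stride_type = threat.get("stride", "")
--         if stride_type in stride:
--             stride[stride_type] = True
--
--     return stride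
-- ===== SOURCE B (Python) =====
-- def _check_stride_coverage(threats):
--     """Check STRIDE coverage."""
--     def covered(name):
--         return any(t.get("stride", "") == name for t in threats)
--     return {
--         name: covered(name)
--         for name in (
--             "Spoofing",
--             "Tampering",
--             "Repudiation",
--             "Info Disclosure",
--             "DoS",
--             "Elevation",
--         )
--     }
-- ===== Notes on version B (the rewrite author's own statement) =====
-- stated objective: alternative
-- what changed: Inverts the loop nesting: instead of one pass over threats mutating a pre-initialized flag dict, B iterates over the six fixed category names and for each performs an early-exiting any() scan of the threats, maintaining no mutable state.
import Mathlib
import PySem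

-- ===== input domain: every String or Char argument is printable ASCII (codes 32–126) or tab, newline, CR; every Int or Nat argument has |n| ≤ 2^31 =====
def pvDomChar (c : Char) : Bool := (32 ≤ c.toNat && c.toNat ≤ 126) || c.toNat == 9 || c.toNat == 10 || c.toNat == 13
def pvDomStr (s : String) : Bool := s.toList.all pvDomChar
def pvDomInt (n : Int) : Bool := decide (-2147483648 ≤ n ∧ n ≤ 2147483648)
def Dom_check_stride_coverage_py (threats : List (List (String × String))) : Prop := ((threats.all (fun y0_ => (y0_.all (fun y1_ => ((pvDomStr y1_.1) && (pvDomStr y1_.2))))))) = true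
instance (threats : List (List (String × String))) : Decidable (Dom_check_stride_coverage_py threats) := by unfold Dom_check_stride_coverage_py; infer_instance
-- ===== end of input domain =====

-- B inverts A's loop nesting: a stateless scan of threats per fixed category name instead of one mutating pass over a pre-initialized flag dict (alternative decomposition, same cost).


-- ===== PORT A =====
-- the initial dict literal {"Spoofing": False, …}
def pvStrideInit : PySem.Dict String Bool :=
  PySem.Dict.ofList [("Spoofing", false), ("Tampering", false), ("Repudiation", false),
    ("Info Disclosure", false), ("DoS", false), ("Elevation", false)]

def check_stride_coverage_py (threats : List (List (String × String))) : List (String × Bool) :=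
  (threats.foldl
    (fun stride threat =>
      let stride_type := (PySem.Dict.ofList threat).getD "stride" ""
      if stride.contains stride_type then stride.insert stride_type true else stride)
    pvStrideInit).items

-- ===== PORT B =====
-- B's helper 'covered(name)': an early-exiting any() scan of threats
def pvCovered (threats : List (List (String × String))) (name : String) : Bool :=
  threats.any (fun t => (PySem.Dict.ofList t).getD "stride" "" == name)

def check_stride_coverage_py_alt (threats : List (List (String × String))) : List (String × Bool) :=
  ["Spoofing", "Tampering", "Repudiation", "Info Disclosure", "DoS", "Elevation"].map
    (fun name => (name, pvCovered threats name))

-- ===== PRECONDITION & SPEC =====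
def Spec_check_stride_coverage_py (threats : List (List (String × String))) (out : List (String × Bool)) : Prop := out = check_stride_coverage_py_alt threats
instance (threats : List (List (String × String))) (out : List (String × Bool)) : Decidable (Spec_check_stride_coverage_py threats out) := by unfold Spec_check_stride_coverage_py; infer_instance

-- ===== CLAIM (what is proved, stated in full; the proofs are below) =====
def Claim_equal_check_stride_coverage_py : Prop := ∀ (threats : List (List (String × String))), Dom_check_stride_coverage_py threats → Spec_check_stride_coverage_py threats (check_stride_coverage_py threats)

-- ===== LEMMAS AND PROOFS =====

-- the stride value A reads from one threat
def pvStrideOf (t : List (String × String)) : String := (PySem.Dict.ofList t).getD "stride" ""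

-- A's loop body
def pvStep (d : PySem.Dict String Bool) (t : List (String × String)) : PySem.Dict String Bool :=
  if d.contains (pvStrideOf t) then d.insert (pvStrideOf t) true else d

lemma pvStep_keys (d : PySem.Dict String Bool) (t : List (String × String)) :
    (pvStep d t).keys = d.keys := by
  unfold pvStep
  split_ifs with h
  · exact PySem.Dict.keys_insert_of_contains _ _ h
  · rfl

lemma pvFoldl_keys (ts : List (List (String × String))) (d : PySem.Dict String Bool) :
    (ts.foldl pvStep d).keys = d.keys := by
  induction ts generalizing d with
  | nil => rfl
  | cons t ts ih => simp [List.foldl_cons, ih, pvStep_keys]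

lemma pvFoldl_getD (ts : List (List (String × String))) (d : PySem.Dict String Bool) (k : String) :
    (ts.foldl pvStep d).getD k false
      = (d.getD k false || (d.contains k && ts.any (fun t => pvStrideOf t == k))) := by
  induction ts generalizing d with
  | nil => simp
  | cons t ts ih =>
    rw [List.foldl_cons, ih]
    unfold pvStep
    split_ifs with hc
    · by_cases hk : k = pvStrideOf t
      · subst hk
        simp [hc]
      · have hb : (pvStrideOf t == k) = false := by
          simp only [beq_eq_false_iff_ne, ne_eq]
          exact fun h => hk h.symm
        have hb' : (k == pvStrideOf t) = false := by simp [hk]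
        simp [PySem.Dict.getD_insert, PySem.Dict.contains_insert, hb, hb', hk]
    · by_cases hk : k = pvStrideOf t
      · subst hk
        simp [show d.contains (pvStrideOf t) = false from by simpa using hc]
      · have hb : (pvStrideOf t == k) = false := by
          simp only [beq_eq_false_iff_ne, ne_eq]
          exact fun h => hk h.symm
        simp [hb]

-- ===== VERDICT (by name: the statement is the Claim_ definition above) =====
theorem check_stride_coverage_py_spec : Claim_equal_check_stride_coverage_py := by
  intro threats _
  unfold Spec_check_stride_coverage_py check_stride_coverage_py check_stride_coverage_py_alt
  have hfold : threats.foldl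
      (fun stride threat =>
        let stride_type := (PySem.Dict.ofList threat).getD "stride" ""
        if stride.contains stride_type then stride.insert stride_type true else stride)
      pvStrideInit = threats.foldl pvStep pvStrideInit := by
    rfl
  rw [hfold]
  have hkeys : (threats.foldl pvStep pvStrideInit).keys = pvStrideInit.keys :=
    pvFoldl_keys threats pvStrideInit
  have hnd : (threats.foldl pvStep pvStrideInit).keys.Nodup := by
    rw [hkeys]; decide
  rw [PySem.Dict.items_eq_map_keys _ hnd false, hkeys]
  have hinit : pvStrideInit.keys
      = ["Spoofing", "Tampering", "Repudiation", "Info Disclosure", "DoS", "Elevation"] := by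
    decide
  rw [hinit]
  apply List.map_congr_left
  intro k hk
  rw [pvFoldl_getD]
  have hg : pvStrideInit.getD k false = false := by
    fin_cases hk <;> decide
  have hc : pvStrideInit.contains k = true := by
    fin_cases hk <;> decide
  rw [hg, hc]
  simp [pvCovered, pvStrideOf]
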